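-- pv_equiv track=rewrite | github.com/jiarui-liu/MultilingualAITerminology | translator/get_terms.py | get_original_indices
-- ===== SOURCE A (Python) =====
-- def get_original_indices(lemmatized_tokens, token_indices, substring):
--     substring = substring.split()
--     for i in range(len(token_indices) - len(substring) + 1):
--         # Check if the n adjacent lemmatized tokens match
--         match = True
--         for j in range(len(substring)):
--             if lemmatized_tokens[i + j] != substring[j]:
--                 match = False
--                 break
--         if match:
--             # Get the original start and end indices of the matched sequence
--             start_idx = token_indices[i][1]
--             end_idx = token_indices[i + len(substring) - 1][2]
--             return start_idx, end_idx
--     return None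
-- ===== SOURCE B (Python) =====
-- def _tok_hash(t):
--     h = 0
--     for c in t:
--         h = (h * 31 + ord(c)) % 2305843009213693951
--     return h
--
--
-- def get_original_indices(lemmatized_tokens, token_indices, substring):
--     pattern = substring.split()
--     m = len(pattern)
--     # only positions that carry original-index data are searchable
--     text = lemmatized_tokens[:len(token_indices)]
--     hs = [_tok_hash(t) for t in text]
--     target = sum(_tok_hash(p) for p in pattern)
--     window = sum(hs[:m])
--     for i in range(len(text) - m + 1):
--         if i > 0:
--             window += hs[i + m - 1] - hs[i - 1]
--         if window == target and text[i:i + m] == pattern: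
--             return token_indices[i][1], token_indices[i + m - 1][2]
--     return None
-- ===== Notes on version B (the rewrite author's own statement) =====
-- stated objective: alternative
-- what changed: Replaces the nested window-comparison loop with a Rabin-Karp style scan: per-token integer hashes are computed once, a rolling window sum is maintained in one pass, and a token window is compared only on a hash hit (and verified there, so the result is exact); Pre_ excludes only the inputs where A raises IndexError (empty pattern with empty token_indices, or a scan that runs off a too-short lemmatized_tokens list).
import Mathlib
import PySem

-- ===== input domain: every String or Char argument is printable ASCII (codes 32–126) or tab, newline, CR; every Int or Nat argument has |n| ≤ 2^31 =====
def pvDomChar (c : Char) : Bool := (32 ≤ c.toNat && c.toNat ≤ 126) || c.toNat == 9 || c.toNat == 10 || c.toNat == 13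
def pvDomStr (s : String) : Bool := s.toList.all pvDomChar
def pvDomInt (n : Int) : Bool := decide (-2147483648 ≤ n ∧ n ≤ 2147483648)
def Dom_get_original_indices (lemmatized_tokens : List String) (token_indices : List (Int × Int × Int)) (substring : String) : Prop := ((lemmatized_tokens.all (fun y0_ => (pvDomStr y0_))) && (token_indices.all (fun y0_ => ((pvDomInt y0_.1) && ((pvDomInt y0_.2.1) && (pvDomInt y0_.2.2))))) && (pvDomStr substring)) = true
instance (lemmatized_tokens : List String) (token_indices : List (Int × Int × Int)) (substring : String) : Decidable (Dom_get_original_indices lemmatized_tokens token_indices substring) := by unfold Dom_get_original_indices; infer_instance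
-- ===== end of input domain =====

-- B replaces A's nested window-comparison loop by a Rabin-Karp rolling-sum token-hash scan over
-- the positions carrying index data, comparing a window only on a hash hit; exact same value on Pre_.


-- ===== PORT A =====
-- inner loop 'for j in range(len(substring)): if lemmatized_tokens[i+j] != substring[j]: break';
-- pyGet? = none is where Python raises IndexError (excluded by Pre_)
def pvInnerA (ltoks : List String) : Nat → List String → Bool
  | _, [] => true
  | idx, p :: ps =>
    match PySem.List.pyGet? ltoks (idx : Int) with
    | some t => if t ≠ p then false else pvInnerA ltoks (idx + 1) ps
    | none => false

-- outer loop 'for i in range(len(token_indices) - len(substring) + 1)', c = iterations left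
def pvOuterA (ltoks : List String) (tidx : List (Int × Int × Int)) (pat : List String) :
    Nat → Nat → Option (Int × Int)
  | _, 0 => none
  | i, c + 1 =>
    if pvInnerA ltoks i pat then
      match PySem.List.pyGet? tidx (i : Int), PySem.List.pyGet? tidx ((i : Int) + (pat.length : Int) - 1) with
      | some a, some b => some (a.2.1, b.2.2)
      | _, _ => none   -- Python raises IndexError here (excluded by Pre_)
    else pvOuterA ltoks tidx pat (i + 1) c

def get_original_indices (lemmatized_tokens : List String) (token_indices : List (Int × Int × Int)) (substring : String) : Option (Int × Int) :=
  let pat := PySem.Str.split₀ substring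
  pvOuterA lemmatized_tokens token_indices pat 0 (token_indices.length + 1 - pat.length)

-- ===== PORT B =====
-- _tok_hash(t)
def pvTokHash (t : String) : Int :=
  t.toList.foldl (fun h c => (h * 31 + (c.toNat : Int)) % 2305843009213693951) 0

-- B's scan 'for i in range(len(text) - m + 1)'; i = position, c = iterations left, w = rolling
-- window sum.  hs[i+m-1] / hs[i-1] are in range whenever Python reads them, so getD is exact;
-- token_indices[i + m - 1] may be a Python negative index (m = 0), hence pyGet?.
def pvScanB (pat : List String) (tidx : List (Int × Int × Int)) (hs : List Int)
    (text : List String) (target : Int) (m : Nat) :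
    Nat → Nat → Int → Option (Int × Int)
  | _, 0, _ => none
  | i, c + 1, w =>
    let w' := if 0 < i then w + hs.getD (i + m - 1) 0 - hs.getD (i - 1) 0 else w
    if w' = target ∧ PySem.List.slice text (some (i : Int)) (some ((i : Int) + (m : Int))) = pat then
      match PySem.List.pyGet? tidx (i : Int), PySem.List.pyGet? tidx ((i : Int) + (m : Int) - 1) with
      | some a, some b => some (a.2.1, b.2.2)
      | _, _ => none   -- Python raises IndexError here (excluded by Pre_)
    else pvScanB pat tidx hs text target m (i + 1) c w'

def get_original_indices_alt (lemmatized_tokens : List String) (token_indices : List (Int × Int × Int)) (substring : String) : Option (Int × Int) :=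
  let pat := PySem.Str.split₀ substring
  let m := pat.length
  let text := PySem.List.slice lemmatized_tokens none (some (token_indices.length : Int))  -- lemmatized_tokens[:len(token_indices)]
  let hs := text.map pvTokHash
  let target := (pat.map pvTokHash).sum
  let window := (PySem.List.slice hs none (some (m : Int))).sum       -- sum(hs[:m])
  pvScanB pat token_indices hs text target m 0 (text.length + 1 - m) window

-- ===== PRECONDITION & SPEC =====
-- Pre_ excludes exactly the inputs on which the Python A raises IndexError: an empty token
-- pattern with empty token_indices, and a lemmatized_tokens list so short that A's scan runs
-- off its end (no full window equals the pattern, yet some window sticking out past the end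
-- agrees with the pattern up to the end, so the inner loop reads past the list).
def Pre_get_original_indices (lemmatized_tokens : List String) (token_indices : List (Int × Int × Int)) (substring : String) : Prop :=
  (PySem.Str.split₀ substring = [] → token_indices ≠ []) ∧
  ¬ (PySem.Str.split₀ substring ≠ [] ∧
     (PySem.Str.split₀ substring).length ≤ token_indices.length ∧
     lemmatized_tokens.length < token_indices.length ∧
     (∀ i < lemmatized_tokens.length + 1,
        i + (PySem.Str.split₀ substring).length ≤ lemmatized_tokens.length →
        (lemmatized_tokens.drop i).take (PySem.Str.split₀ substring).length ≠ PySem.Str.split₀ substring) ∧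
     (∃ i < token_indices.length + 1 - (PySem.Str.split₀ substring).length,
        lemmatized_tokens.length < i + (PySem.Str.split₀ substring).length ∧
        lemmatized_tokens.drop i = (PySem.Str.split₀ substring).take (lemmatized_tokens.length - i)))
instance (lemmatized_tokens : List String) (token_indices : List (Int × Int × Int)) (substring : String) : Decidable (Pre_get_original_indices lemmatized_tokens token_indices substring) := by unfold Pre_get_original_indices; infer_instance

def pvWitness_get_original_indices : List String × (List (Int × Int × Int)) × String :=
  (["a", "b"], [(0, 0, 1), (1, 2, 3)], "b")

def Spec_get_original_indices (lemmatized_tokens : List String) (token_indices : List (Int × Int × Int)) (substring : String) (out : Option (Int × Int)) : Prop := out = get_original_indices_alt lemmatized_tokens token_indices substring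
instance (lemmatized_tokens : List String) (token_indices : List (Int × Int × Int)) (substring : String) (out : Option (Int × Int)) : Decidable (Spec_get_original_indices lemmatized_tokens token_indices substring out) := by unfold Spec_get_original_indices; infer_instance

-- ===== CLAIM (what is proved, stated in full; the proofs are below) =====
def Claim_equal_get_original_indices : Prop := ∀ (lemmatized_tokens : List String) (token_indices : List (Int × Int × Int)) (substring : String), Dom_get_original_indices lemmatized_tokens token_indices substring → Pre_get_original_indices lemmatized_tokens token_indices substring → Spec_get_original_indices lemmatized_tokens token_indices substring (get_original_indices lemmatized_tokens token_indices substring)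

-- ===== LEMMAS AND PROOFS =====

-- reference scan with the window fully-in-range guard (A's shape after removing pvInnerA)
def pvNaiveG (lt pat : List String) (ti : List (Int × Int × Int)) (m : Nat) :
    Nat → Nat → Option (Int × Int)
  | _, 0 => none
  | i, c + 1 =>
    if i + m ≤ lt.length ∧ (lt.drop i).take m = pat then
      match PySem.List.pyGet? ti (i : Int), PySem.List.pyGet? ti ((i : Int) + (m : Int) - 1) with
      | some a, some b => some (a.2.1, b.2.2)
      | _, _ => none
    else pvNaiveG lt pat ti m (i + 1) c

-- reference scan without the guard (B's shape after removing the rolling hash)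
def pvNaive (text pat : List String) (ti : List (Int × Int × Int)) (m : Nat) :
    Nat → Nat → Option (Int × Int)
  | _, 0 => none
  | i, c + 1 =>
    if (text.drop i).take m = pat then
      match PySem.List.pyGet? ti (i : Int), PySem.List.pyGet? ti ((i : Int) + (m : Int) - 1) with
      | some a, some b => some (a.2.1, b.2.2)
      | _, _ => none
    else pvNaive text pat ti m (i + 1) c

lemma pv_innerA_iff (ltoks : List String) :
    ∀ (pat : List String) (i : Nat), i + pat.length ≤ ltoks.length →
      (pvInnerA ltoks i pat = true ↔ (ltoks.drop i).take pat.length = pat) := by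
  intro pat
  induction pat with
  | nil => intro i h; simp [pvInnerA]
  | cons p ps ih =>
    intro i h
    have h' : i + (ps.length + 1) ≤ ltoks.length := by simpa using h
    have hi : i < ltoks.length := by omega
    rw [pvInnerA, PySem.List.pyGet?_natCast, List.getElem?_eq_getElem hi]
    rw [List.drop_eq_getElem_cons hi]
    simp only [List.length_cons, List.take_succ_cons]
    by_cases hp : ltoks[i] = p
    · simp only [hp, ne_eq, not_true_eq_false, ite_false]
      rw [ih (i+1) (by omega)]
      simp
    · simp [hp]

lemma pv_innerA_bound (ltoks : List String) :
    ∀ (pat : List String) (i : Nat), pat ≠ [] → pvInnerA ltoks i pat = true → i + pat.length ≤ ltoks.length := by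
  intro pat
  induction pat with
  | nil => intro i hne _; exact absurd rfl hne
  | cons p ps ih =>
    intro i _ h
    rw [pvInnerA] at h
    cases hg : PySem.List.pyGet? ltoks (i : Int) with
    | none => rw [hg] at h; simp at h
    | some t =>
      rw [hg] at h
      have hi : i < ltoks.length := by
        rw [PySem.List.pyGet?_natCast] at hg
        exact List.getElem?_eq_some_iff.mp hg |>.1
      by_cases hp : t = p
      · simp only [hp, ne_eq, not_true_eq_false, ite_false] at h
        by_cases hps : ps = []
        · subst hps; simp only [List.length_cons, List.length_nil]; omega
        · have := ih (i + 1) hps h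
          simp only [List.length_cons]; omega
      · simp [hp] at h

lemma pv_window_take (ltoks : List String) (n i m : Nat) (h : i + m ≤ n) :
    ((ltoks.take n).drop i).take m = (ltoks.drop i).take m := by
  rw [List.drop_take, List.take_take]
  congr 1; omega

-- A's loop is the guarded reference scan
lemma pv_outerA_naiveG (ltoks : List String) (tidx : List (Int × Int × Int)) (pat : List String)
    (hm : pat ≠ []) :
    ∀ (c i : Nat), pvOuterA ltoks tidx pat i c = pvNaiveG ltoks pat tidx pat.length i c := by
  intro c
  induction c with
  | zero => intro i; rfl
  | succ c ih =>
    intro i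
    rw [pvOuterA, pvNaiveG]
    have hcond : pvInnerA ltoks i pat = true ↔
        (i + pat.length ≤ ltoks.length ∧ (ltoks.drop i).take pat.length = pat) := by
      constructor
      · intro h
        have hb := pv_innerA_bound ltoks pat i hm h
        exact ⟨hb, (pv_innerA_iff ltoks pat i hb).mp h⟩
      · intro h
        exact (pv_innerA_iff ltoks pat i h.1).mpr h.2
    by_cases hA : pvInnerA ltoks i pat = true
    · rw [if_pos hA, if_pos (hcond.mp hA)]
    · rw [if_neg hA, if_neg (fun h => hA (hcond.mpr h)), ih]

-- guard false everywhere past the end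
lemma pv_naiveG_none (lt pat : List String) (ti : List (Int × Int × Int)) (m : Nat) :
    ∀ (c i : Nat), lt.length < i + m → pvNaiveG lt pat ti m i c = none := by
  intro c
  induction c with
  | zero => intro i _; rfl
  | succ c ih =>
    intro i h
    rw [pvNaiveG, if_neg (fun hc => absurd hc.1 (by omega))]
    exact ih (i + 1) (by omega)

-- guarded scan over lt = unguarded scan over lt.take n (shorter count)
lemma pv_bridge (lt pat : List String) (ti : List (Int × Int × Int)) (n : Nat)
    (_hm : 1 ≤ pat.length) :
    ∀ (cB i cA : Nat),
      i + cB = (lt.take n).length + 1 - pat.length →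
      i + cA = n + 1 - pat.length →
      pvNaiveG lt pat ti pat.length i cA = pvNaive (lt.take n) pat ti pat.length i cB := by
  intro cB
  induction cB with
  | zero =>
    intro i cA hB hA
    have hT : (lt.take n).length = min n lt.length := List.length_take
    have hdisj : cA = 0 ∨ lt.length < i + pat.length := by omega
    rcases hdisj with h0 | hover
    · subst h0; rfl
    · rw [pv_naiveG_none lt pat ti pat.length cA i hover]; rfl
  | succ cB ih =>
    intro i cA hB hA
    have hT : (lt.take n).length = min n lt.length := List.length_take
    have him : i + pat.length ≤ (lt.take n).length := by omega
    have hiL : i + pat.length ≤ lt.length := by omega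
    have hin : i + pat.length ≤ n := by omega
    obtain ⟨cA', rfl⟩ : ∃ cA', cA = cA' + 1 := ⟨cA - 1, by omega⟩
    rw [pvNaiveG, pvNaive]
    have hwin : ((lt.take n).drop i).take pat.length = (lt.drop i).take pat.length :=
      pv_window_take lt n i pat.length hin
    by_cases hmatch : ((lt.take n).drop i).take pat.length = pat
    · rw [if_pos hmatch, if_pos ⟨hiL, by rw [← hwin]; exact hmatch⟩]
    · rw [if_neg hmatch, if_neg (fun h => hmatch (by rw [hwin]; exact h.2))]
      exact ih (i + 1) cA' (by omega) (by omega)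

-- rolling-window step
lemma pv_sw_roll (hs : List Int) (m j : Nat) (hm : 1 ≤ m) (h : j + m < hs.length) :
    ((hs.drop j).take m).sum + hs.getD (j + m) 0 - hs.getD j 0
      = ((hs.drop (j + 1)).take m).sum := by
  obtain ⟨m', rfl⟩ : ∃ m', m = m' + 1 := ⟨m - 1, by omega⟩
  have hj : j < hs.length := by omega
  have hd1 : hs.drop j = hs[j] :: hs.drop (j + 1) := List.drop_eq_getElem_cons hj
  have hlen : m' < (hs.drop (j + 1)).length := by simp; omega
  have hd2 : (hs.drop (j + 1)).take (m' + 1)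
      = (hs.drop (j + 1)).take m' ++ [(hs.drop (j + 1))[m']] := by
    rw [List.take_add_one]; simp [List.getElem?_eq_getElem hlen]
  have hg : (hs.drop (j + 1))[m'] = hs[j + 1 + m']'(by omega) := by
    simp [List.getElem_drop]
  have hgd1 : hs.getD (j + (m' + 1)) 0 = hs[j + 1 + m']'(by omega) := by
    simp [List.getD_eq_getElem?_getD, List.getElem?_eq_getElem (show j + (m'+1) < hs.length by omega)]
    congr 1; omega
  have hgd2 : hs.getD j 0 = hs[j] := by
    simp [List.getD_eq_getElem?_getD, List.getElem?_eq_getElem hj]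
  rw [hd1, hd2, hg, hgd1, hgd2]
  simp only [List.take_succ_cons, List.sum_cons, List.sum_append]
  simp only [List.sum_nil]
  ring

-- B's rolling-hash scan is the unguarded reference scan
lemma pv_scanB_eq (pat text : List String) (tidx : List (Int × Int × Int)) (hm : pat ≠ []) :
    ∀ (c i : Nat) (w : Int),
      i + c = text.length + 1 - pat.length →
      w = (((text.map pvTokHash).drop (i - 1)).take pat.length).sum →
      pvScanB pat tidx (text.map pvTokHash) text ((pat.map pvTokHash).sum) pat.length i c w
        = pvNaive text pat tidx pat.length i c := by
  intro c
  induction c with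
  | zero => intro i w _ _; rfl
  | succ c ih =>
    intro i w hc hw
    have hm1 : 1 ≤ pat.length := List.length_pos_iff.mpr hm
    have hlenh : (text.map pvTokHash).length = text.length := List.length_map ..
    have him : i + pat.length ≤ text.length := by omega
    rw [pvScanB, pvNaive]
    have hw' : (if 0 < i then w + (text.map pvTokHash).getD (i + pat.length - 1) 0
                  - (text.map pvTokHash).getD (i - 1) 0 else w)
        = (((text.map pvTokHash).drop i).take pat.length).sum := by
      by_cases hi0 : 0 < i
      · obtain ⟨j, rfl⟩ : ∃ j, i = j + 1 := ⟨i - 1, by omega⟩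
        rw [if_pos hi0, hw]
        have h1 : j + 1 + pat.length - 1 = j + pat.length := by omega
        have h2 : j + 1 - 1 = j := by omega
        rw [h1, h2]
        exact pv_sw_roll (text.map pvTokHash) pat.length j hm1 (by omega)
      · have hi : i = 0 := by omega
        rw [if_neg hi0, hw, hi]
    rw [hw']
    rw [PySem.List.slice_natCast_add]
    have hcond : (((text.map pvTokHash).drop i).take pat.length).sum = (pat.map pvTokHash).sum
          ∧ (text.drop i).take pat.length = pat
        ↔ (text.drop i).take pat.length = pat := by
      constructor
      · exact fun h => h.2
      · intro h
        refine ⟨?_, h⟩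
        rw [← List.map_drop, ← List.map_take, h]
    by_cases hmatch : (text.drop i).take pat.length = pat
    · rw [if_pos (hcond.mpr hmatch), if_pos hmatch]
    · rw [if_neg (fun hb => hmatch (hcond.mp hb)), if_neg hmatch]
      exact ih (i + 1) _ (by omega) (by simp)

-- ===== VERDICT (by name: the statement is the Claim_ definition above) =====
theorem get_original_indices_spec : Claim_equal_get_original_indices := by
  intro lt ti s _ _
  unfold Spec_get_original_indices
  simp only [get_original_indices, get_original_indices_alt]
  rw [PySem.List.slice_to_natCast]
  by_cases hm : PySem.Str.split₀ s = []
  · -- empty pattern: both return the match at i = 0 (token_indices[0], token_indices[-1])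
    rw [hm]
    simp only [List.length_nil, Nat.sub_zero, List.length_take]
    have hs0 : (PySem.List.slice (List.take ti.length (List.map pvTokHash lt)) none (some (0:Int))).sum = 0 := by
      have A := PySem.List.slice_to_natCast (xs := List.take ti.length (List.map pvTokHash lt)) (b := 0)
      norm_num at A; rw [A]; simp
    have hs1 : PySem.List.slice (List.take ti.length lt) none (some (0:Int)) = [] := by
      have A := PySem.List.slice_to_natCast (xs := List.take ti.length lt) (b := 0)
      norm_num at A; simpa using A
    rw [pvOuterA, pvScanB]
    simp only [pvInnerA]
    simp [hs0, hs1]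
  · have hm1 : 1 ≤ (PySem.Str.split₀ s).length := List.length_pos_iff.mpr hm
    rw [pv_outerA_naiveG lt ti (PySem.Str.split₀ s) hm]
    rw [pv_bridge lt (PySem.Str.split₀ s) ti ti.length hm1
        ((lt.take ti.length).length + 1 - (PySem.Str.split₀ s).length) 0
        (ti.length + 1 - (PySem.Str.split₀ s).length) (by omega) (by omega)]
    rw [pv_scanB_eq (PySem.Str.split₀ s) (lt.take ti.length) ti hm
        ((lt.take ti.length).length + 1 - (PySem.Str.split₀ s).length) 0 _ (by omega)
        (by rw [PySem.List.slice_to_natCast]; simp)]
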